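-- pv_equiv track=rewrite | github.com/avav1818/Python-challenges | PythonPrinciples/tic_tac_toe.py | get_row_col
-- ===== SOURCE A (Python) =====
-- def get_row_col(string):
--     column_command = string[0]
--     row_command = string[1]
--
--     # Key value pair of row numbers and corresponding index value on tic-tac-toe board
--     row_indexes = { "1" : 0, "2" : 1, "3" : 2}
--     # Key value pair of columns letter and corresponding index value on tic-tac-toe board
--     column_indexes = { "A" : 0, "B" : 1, "C" : 2}
--
--      # Stores coordinates on the board as tuple values
--     board_coordinates = ()
--
--     for key in row_indexes:
--         for key2 in column_indexes:
--             if key == row_command: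
--                 if key2 == column_command:
--                     board_coordinates = board_coordinates + (row_indexes[row_command], column_indexes[column_command])
--                     return board_coordinates
-- ===== SOURCE B (Python) =====
-- def get_row_col(string):
--     # Direct table lookups replace the nested dict-scanning loops.
--     col = {"A": 0, "B": 1, "C": 2}.get(string[0])
--     row = {"1": 0, "2": 1, "3": 2}.get(string[1])
--     if col is None or row is None:
--         return None
--     return (row, col)
-- ===== Notes on version B (the rewrite author's own statement) =====
-- stated objective: simpler
-- what changed: Replaces the 3x3 nested loop scan over both dicts (with equality branches and a re-lookup on match) by two direct dict .get lookups and a guarded return.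
import Mathlib
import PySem

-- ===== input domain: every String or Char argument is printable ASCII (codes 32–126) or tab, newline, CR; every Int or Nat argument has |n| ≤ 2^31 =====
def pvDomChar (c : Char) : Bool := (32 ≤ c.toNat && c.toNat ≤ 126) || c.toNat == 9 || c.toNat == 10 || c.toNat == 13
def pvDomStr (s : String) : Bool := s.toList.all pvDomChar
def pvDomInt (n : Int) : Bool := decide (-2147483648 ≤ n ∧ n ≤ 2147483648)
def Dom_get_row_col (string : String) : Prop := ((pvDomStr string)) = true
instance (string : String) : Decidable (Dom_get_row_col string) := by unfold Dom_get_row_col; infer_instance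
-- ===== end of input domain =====

-- B replaces A's nested scan over both dicts by two direct dict lookups (return value only).
-- Dicts are ported as association lists per the type convention; first-match lookup.

-- ===== PORT A =====
-- dict[k] on a key known to be present (first match, default irrelevant here)
def pvLookupD (d : List (Char × Int)) (k : Char) : Int :=
  ((d.find? (fun p => p.1 == k)).map Prod.snd).getD 0

-- inner 'for key2 in column_indexes' loop, with the early return on the double match
def pvInnerA (k2s : List Char) (key : Char)
    (rows cols : List (Char × Int)) (rc cc : Char) : Option (Int × Int) :=
  match k2s with
  | [] => none
  | key2 :: rest =>
    if key == rc then
      if key2 == cc then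
        some (pvLookupD rows rc, pvLookupD cols cc)
      else pvInnerA rest key rows cols rc cc
    else pvInnerA rest key rows cols rc cc

-- outer 'for key in row_indexes' loop
def pvLoopA (ks : List Char) (rows cols : List (Char × Int)) (rc cc : Char) : Option (Int × Int) :=
  match ks with
  | [] => none
  | key :: rest =>
    match pvInnerA (cols.map Prod.fst) key rows cols rc cc with
    | some r => some r
    | none => pvLoopA rest rows cols rc cc

def get_row_col (string : String) : Option (Int × Int) :=
  match PySem.Str.pyGet? string 0, PySem.Str.pyGet? string 1 with
  | some column_command, some row_command =>
      let row_indexes : List (Char × Int) := [('1', 0), ('2', 1), ('3', 2)]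
      let column_indexes : List (Char × Int) := [('A', 0), ('B', 1), ('C', 2)]
      pvLoopA (row_indexes.map Prod.fst) row_indexes column_indexes row_command column_command
  | _, _ => none  -- IndexError (string shorter than 2); excluded by Pre_

-- ===== PORT B =====
-- dict.get(k): first match or None
def pvGet? (d : List (Char × Int)) (k : Char) : Option Int :=
  (d.find? (fun p => p.1 == k)).map Prod.snd

def get_row_col_alt (string : String) : Option (Int × Int) :=
  (PySem.Str.pyGet? string 0).bind fun c0 =>   -- string[0]; none = IndexError, as in A
  (PySem.Str.pyGet? string 1).bind fun c1 =>   -- string[1]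
    match pvGet? [('A', 0), ('B', 1), ('C', 2)] c0,
          pvGet? [('1', 0), ('2', 1), ('3', 2)] c1 with
    | none, _ => none        -- col is None
    | _, none => none        -- row is None
    | some col, some row => some (row, col)

-- ===== PRECONDITION & SPEC =====
-- Pre_ excludes exactly the strings of length < 2, on which A raises IndexError.
def Pre_get_row_col (string : String) : Prop := 2 ≤ string.toList.length
instance (string : String) : Decidable (Pre_get_row_col string) := by unfold Pre_get_row_col; infer_instance
def pvWitness_get_row_col : String := "A1"

def Spec_get_row_col (string : String) (out : Option (Int × Int)) : Prop := out = get_row_col_alt string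
instance (string : String) (out : Option (Int × Int)) : Decidable (Spec_get_row_col string out) := by unfold Spec_get_row_col; infer_instance

-- ===== CLAIM =====
def Claim_equal_get_row_col : Prop := ∀ (string : String), Dom_get_row_col string → Pre_get_row_col string → Spec_get_row_col string (get_row_col string)

-- ===== LEMMAS AND PROOFS =====
theorem pv_core (c0 c1 : Char) :
    pvLoopA (([('1', (0 : Int)), ('2', 1), ('3', 2)]).map Prod.fst)
      [('1', 0), ('2', 1), ('3', 2)] [('A', 0), ('B', 1), ('C', 2)] c1 c0 =
    (match pvGet? [('A', 0), ('B', 1), ('C', 2)] c0,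
           pvGet? [('1', 0), ('2', 1), ('3', 2)] c1 with
     | none, _ => none
     | _, none => none
     | some col, some row => some (row, col)) := by
  by_cases h1 : '1' = c1
  case pos =>
    subst h1
    by_cases hA : 'A' = c0
    · subst hA; decide
    · by_cases hB : 'B' = c0
      · subst hB; decide
      · by_cases hC : 'C' = c0
        · subst hC; decide
        · have eA : ('A' == c0) = false := by simp [hA]
          have eB : ('B' == c0) = false := by simp [hB]
          have eC : ('C' == c0) = false := by simp [hC]
          simp [pvLoopA, pvInnerA, pvGet?, List.find?, eA, eB, eC]
  case neg =>
  by_cases h2 : '2' = c1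
  case pos =>
    subst h2
    by_cases hA : 'A' = c0
    · subst hA; decide
    · by_cases hB : 'B' = c0
      · subst hB; decide
      · by_cases hC : 'C' = c0
        · subst hC; decide
        · have eA : ('A' == c0) = false := by simp [hA]
          have eB : ('B' == c0) = false := by simp [hB]
          have eC : ('C' == c0) = false := by simp [hC]
          simp [pvLoopA, pvInnerA, pvGet?, List.find?, eA, eB, eC]
  case neg =>
  by_cases h3 : '3' = c1
  case pos =>
    subst h3
    by_cases hA : 'A' = c0
    · subst hA; decide
    · by_cases hB : 'B' = c0
      · subst hB; decide
      · by_cases hC : 'C' = c0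
        · subst hC; decide
        · have eA : ('A' == c0) = false := by simp [hA]
          have eB : ('B' == c0) = false := by simp [hB]
          have eC : ('C' == c0) = false := by simp [hC]
          simp [pvLoopA, pvInnerA, pvGet?, List.find?, eA, eB, eC]
  case neg =>
    have e1 : ('1' == c1) = false := by simp [h1]
    have e2 : ('2' == c1) = false := by simp [h2]
    have e3 : ('3' == c1) = false := by simp [h3]
    simp only [pvLoopA, pvInnerA, pvGet?, List.find?, List.map, e1, e2, e3,
      Bool.false_eq_true, if_false, Option.map_none]
    split <;> simp_all

-- ===== VERDICT =====
theorem get_row_col_spec : Claim_equal_get_row_col := by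
  intro s _ hpre
  unfold Spec_get_row_col get_row_col get_row_col_alt
  match h : s.toList with
  | [] => simp [Pre_get_row_col, h] at hpre
  | [_] => simp [Pre_get_row_col, h] at hpre
  | c0 :: c1 :: rest =>
    have h0 : PySem.Str.pyGet? s 0 = some c0 := by
      rw [show (0 : Int) = ((0 : Nat) : Int) from rfl, PySem.Str.pyGet?_natCast, h]; rfl
    have h1 : PySem.Str.pyGet? s 1 = some c1 := by
      rw [show (1 : Int) = ((1 : Nat) : Int) from rfl, PySem.Str.pyGet?_natCast, h]; rfl
    rw [h0, h1, Option.bind_some, Option.bind_some]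
    exact pv_core c0 c1
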